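-- pv_equiv track=rewrite | github.com/youknowone/apple-sys | crates/apple-sys/configure.py | compute_direct_deps
-- ===== SOURCE A (Python) =====
-- def compute_direct_deps(transitive_deps):
--     """Transitive reduction: compute minimal direct deps from full transitive deps.
--
--     For each framework A with transitive deps T(A), the direct deps are:
--         direct(A) = T(A) - union(T(d) for d in T(A))
--     """
--     direct = {}
--     for fw, trans in transitive_deps.items():
--         if not trans:
--             continue
--         indirect = set()
--         for dep in trans:
--             if dep in transitive_deps:
--                 indirect |= transitive_deps[dep]
--         result = trans - indirect
--         if result:
--             direct[fw] = sorted(result)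
--     return direct
-- ===== SOURCE B (Python) =====
-- def compute_direct_deps(transitive_deps):
--     """Transitive reduction: keep each dep that no sibling dep's transitive set covers."""
--     direct = {}
--     for fw, trans in transitive_deps.items():
--         if not trans:
--             continue
--         result = sorted(d for d in trans
--                         if not any(d in transitive_deps.get(e, ()) for e in trans))
--         if result:
--             direct[fw] = result
--     return direct
-- ===== Notes on version B (the rewrite author's own statement) =====
-- stated objective: simpler
-- what changed: Replaces the union-accumulate-then-set-difference pass (build 'indirect' as a growing union of sibling transitive sets, then subtract) with a direct per-candidate filter: a dep is kept iff no sibling dep's transitive set contains it; no intermediate set is materialised.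
import Mathlib
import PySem

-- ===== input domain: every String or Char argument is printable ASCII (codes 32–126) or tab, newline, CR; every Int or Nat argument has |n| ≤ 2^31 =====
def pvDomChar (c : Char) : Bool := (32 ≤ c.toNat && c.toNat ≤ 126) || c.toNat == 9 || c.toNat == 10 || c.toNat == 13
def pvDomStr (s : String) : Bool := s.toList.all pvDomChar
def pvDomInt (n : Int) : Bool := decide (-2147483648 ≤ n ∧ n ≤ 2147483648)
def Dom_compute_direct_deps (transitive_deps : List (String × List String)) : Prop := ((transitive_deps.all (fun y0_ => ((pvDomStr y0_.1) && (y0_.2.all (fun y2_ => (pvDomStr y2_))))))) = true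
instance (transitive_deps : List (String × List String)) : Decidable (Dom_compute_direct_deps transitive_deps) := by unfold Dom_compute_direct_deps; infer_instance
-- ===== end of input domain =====

-- B replaces A's union-accumulate-then-difference with a per-candidate sibling-membership filter (objective: simpler).


-- shared dict primitives on the assoc-list representation (Python dict: first-match lookup, overwrite-in-place-else-append store)
def pvDictGet (d : List (String × List String)) (k : String) : Option (List String) :=
  (d.find? (fun p => p.1 == k)).map (·.2)

def pvDictSet (d : List (String × List String)) (k : String) (v : List String) : List (String × List String) :=
  if d.any (fun p => p.1 == k) then d.map (fun p => if p.1 == k then (p.1, v) else p)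
  else d ++ [(k, v)]

-- ===== PORT A =====
-- for fw, trans: skip empty trans; indirect = union of transitive_deps[dep] for dep in trans that are keys;
-- result = trans - indirect; if result: direct[fw] = sorted(result)
def compute_direct_deps (transitive_deps : List (String × List String)) : List (String × List String) :=
  transitive_deps.foldl (fun direct p =>
    if p.2.isEmpty then direct
    else
      let indirect : PySem.Set String :=
        p.2.foldl (fun ind dep =>
          match pvDictGet transitive_deps dep with
          | some v => PySem.Set.union ind v
          | none => ind) PySem.Set.empty
      let result : PySem.Set String := PySem.Set.diff p.2 indirect
      if result.isEmpty then direct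
      else pvDictSet direct p.1 (PySem.List.sorted result (fun x => x) false)) []

-- ===== PORT B =====
-- for fw, trans: skip empty trans; result = sorted(d for d in trans if no sibling e in trans has d in its transitive set)
def compute_direct_deps_alt (transitive_deps : List (String × List String)) : List (String × List String) :=
  transitive_deps.foldl (fun direct p =>
    if p.2.isEmpty then direct
    else
      let result : List String :=
        PySem.List.sorted
          (p.2.filter (fun d =>
            ! p.2.any (fun e => ((pvDictGet transitive_deps e).getD []).contains d)))
          (fun x => x) false
      if result.isEmpty then direct
      else pvDictSet direct p.1 result) []

-- ===== PRECONDITION & SPEC =====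
def Spec_compute_direct_deps (transitive_deps : List (String × List String)) (out : List (String × List String)) : Prop := out = compute_direct_deps_alt transitive_deps
instance (transitive_deps : List (String × List String)) (out : List (String × List String)) : Decidable (Spec_compute_direct_deps transitive_deps out) := by unfold Spec_compute_direct_deps; infer_instance

-- ===== CLAIM (what is proved, stated in full; the proofs are below) =====
def Claim_equal_compute_direct_deps : Prop := ∀ (transitive_deps : List (String × List String)), Dom_compute_direct_deps transitive_deps → Spec_compute_direct_deps transitive_deps (compute_direct_deps transitive_deps)

-- ===== LEMMAS AND PROOFS =====

-- membership in A's accumulated union: d is indirect iff some sibling e's transitive set contains it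
theorem mem_fold_union (td : List (String × List String)) (l : List String)
    (init : PySem.Set String) (d : String) :
    (d ∈ l.foldl (fun ind dep =>
        match pvDictGet td dep with
        | some v => PySem.Set.union ind v
        | none => ind) init)
      ↔ d ∈ init ∨ ∃ e ∈ l, d ∈ (pvDictGet td e).getD [] := by
  induction l generalizing init with
  | nil => simp
  | cons e l ih =>
    simp only [List.foldl_cons, List.mem_cons]
    cases h : pvDictGet td e with
    | none =>
      rw [ih]
      simp [h]
    | some v =>
      rw [ih]
      simp only [PySem.Set.union, PySem.Set.mem_update, h, Option.getD_some]
      constructor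
      · rintro ((h1 | h1) | ⟨x, hx, hd⟩)
        · exact Or.inl h1
        · exact Or.inr ⟨e, Or.inl rfl, by rw [h]; exact h1⟩
        · exact Or.inr ⟨x, Or.inr hx, hd⟩
      · rintro (h1 | ⟨x, (rfl | hx), hd⟩)
        · exact Or.inl (Or.inl h1)
        · rw [h] at hd; exact Or.inl (Or.inr hd)
        · exact Or.inr ⟨x, hx, hd⟩

-- A's per-framework set difference is B's per-candidate filter, as lists
theorem diff_eq_filter (td : List (String × List String)) (trans : List String) :
    PySem.Set.diff trans
      (trans.foldl (fun ind dep =>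
        match pvDictGet td dep with
        | some v => PySem.Set.union ind v
        | none => ind) PySem.Set.empty)
    = trans.filter (fun d =>
        ! trans.any (fun e => ((pvDictGet td e).getD []).contains d)) := by
  unfold PySem.Set.diff
  apply List.filter_congr
  intro d _
  congr 1
  rw [Bool.eq_iff_iff]
  simp [List.contains_iff_mem, mem_fold_union, PySem.Set.empty]

-- the two loop bodies are the same function
theorem body_eq (td : List (String × List String)) :
    (fun (direct : List (String × List String)) (p : String × List String) =>
      if p.2.isEmpty then direct
      else
        let indirect : PySem.Set String :=
          p.2.foldl (fun ind dep =>
            match pvDictGet td dep with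
            | some v => PySem.Set.union ind v
            | none => ind) PySem.Set.empty
        let result : PySem.Set String := PySem.Set.diff p.2 indirect
        if result.isEmpty then direct
        else pvDictSet direct p.1 (PySem.List.sorted result (fun x => x) false))
    = (fun direct p =>
      if p.2.isEmpty then direct
      else
        let result : List String :=
          PySem.List.sorted
            (p.2.filter (fun d =>
              ! p.2.any (fun e => ((pvDictGet td e).getD []).contains d)))
            (fun x => x) false
        if result.isEmpty then direct
        else pvDictSet direct p.1 result) := by
  funext direct p
  simp only
  rw [diff_eq_filter td p.2]
  simp only [List.isEmpty_iff]
  by_cases h : p.2 = []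
  · rw [if_pos h, if_pos h]
  · rw [if_neg h, if_neg h]
    by_cases h2 : (p.2.filter (fun d =>
        ! p.2.any (fun e => ((pvDictGet td e).getD []).contains d))) = []
    · rw [if_pos h2, if_pos ((PySem.List.sorted_eq_nil_iff _ _ _).mpr h2)]
    · rw [if_neg h2, if_neg (fun hs => h2 ((PySem.List.sorted_eq_nil_iff _ _ _).mp hs))]

-- ===== VERDICT (by name: the statement is the Claim_ definition above) =====
theorem compute_direct_deps_spec : Claim_equal_compute_direct_deps := by
  intro td _
  unfold Spec_compute_direct_deps compute_direct_deps compute_direct_deps_alt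
  rw [body_eq td]
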